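-- pv_equiv track=rewrite | github.com/DTodorov985/tasks | IBAN_formatter.py | iban_formatter
-- ===== SOURCE A (Python) =====
-- def iban_formatter(iban):
--     result = ''
--     counter = 0
--     if len(iban) == 22:
--         for c in iban:
--             if counter % 4 == 0:
--                 result += ' '
--                 result += c
--                 counter += 1
--             else:
--                 result += c
--                 counter += 1
--         counter = 0
--         return result.strip()
--     elif len(iban) == 27:
--         result = iban
--         return result.strip()
--     else:
--         return F"Please check the iban scriptures"
-- ===== SOURCE B (Python) =====
-- def iban_formatter(iban):
--     if len(iban) == 22:
--         return ' '.join(iban[i:i + 4] for i in range(0, len(iban), 4)).strip()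
--     elif len(iban) == 27:
--         return iban.strip()
--     else:
--         return F"Please check the iban scriptures"
-- ===== Notes on version B (the rewrite author's own statement) =====
-- stated objective: simpler
-- what changed: The per-character loop with a modulo-4 counter and string concatenation is replaced by slicing the IBAN into 4-character chunks and joining them with single spaces; the 27 and else branches are kept verbatim.
import Mathlib
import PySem

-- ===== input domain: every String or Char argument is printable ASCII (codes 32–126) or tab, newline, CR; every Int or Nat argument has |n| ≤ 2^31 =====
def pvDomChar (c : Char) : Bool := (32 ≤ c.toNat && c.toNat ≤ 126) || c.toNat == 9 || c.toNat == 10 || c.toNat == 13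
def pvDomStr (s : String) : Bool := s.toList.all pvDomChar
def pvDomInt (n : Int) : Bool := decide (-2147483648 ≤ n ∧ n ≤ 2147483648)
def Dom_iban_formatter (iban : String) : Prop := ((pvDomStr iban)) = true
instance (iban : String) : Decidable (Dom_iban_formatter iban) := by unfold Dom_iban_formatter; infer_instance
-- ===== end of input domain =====

-- B replaces A's per-character loop with a modulo-4 counter by slicing into
-- 4-character chunks joined with spaces (objective: simpler).

-- ===== PORT A =====
def iban_formatter (iban : String) : String :=
  let cs := iban.toList
  if cs.length == 22 then
    -- result = ''; counter = 0; for c in iban: …  (state = (result, counter))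
    let st := cs.foldl (fun (st : List Char × Int) c =>
      if PySem.Int.mod st.2 4 == 0 then (st.1 ++ [' '] ++ [c], st.2 + 1)
      else (st.1 ++ [c], st.2 + 1)) ([], 0)
    String.mk (PySem.Chars.strip st.1)
  else if cs.length == 27 then
    String.mk (PySem.Chars.strip cs)
  else
    "Please check the iban scriptures"

-- ===== PORT B =====
def iban_formatter_alt (iban : String) : String :=
  let cs := iban.toList
  if cs.length == 22 then
    -- ' '.join(iban[i:i+4] for i in range(0, len(iban), 4)).strip()
    String.mk (PySem.Chars.strip (PySem.Chars.join [' ']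
      ((PySem.List.pyRange 0 (cs.length : Int) 4).map
        (fun i => PySem.List.slice cs (some i) (some (i + 4))))))
  else if cs.length == 27 then
    String.mk (PySem.Chars.strip cs)
  else
    "Please check the iban scriptures"

-- ===== PRECONDITION & SPEC =====
def Spec_iban_formatter (iban : String) (out : String) : Prop := out = iban_formatter_alt iban
instance (iban : String) (out : String) : Decidable (Spec_iban_formatter iban out) := by unfold Spec_iban_formatter; infer_instance

-- ===== CLAIM (what is proved, stated in full; the proofs are below) =====
def Claim_equal_iban_formatter : Prop := ∀ (iban : String), Dom_iban_formatter iban → Spec_iban_formatter iban (iban_formatter iban)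

-- ===== LEMMAS AND PROOFS =====

-- stripping ignores a leading space
theorem strip_space_cons (x : List Char) :
    PySem.Chars.strip (' ' :: x) = PySem.Chars.strip x := by
  simp [PySem.Chars.strip, PySem.Chars.lstrip, List.dropWhile, PySem.Chars.isspace]

-- ===== VERDICT (by name: the statement is the Claim_ definition above) =====
theorem iban_formatter_spec : Claim_equal_iban_formatter := by
  intro iban _
  unfold Spec_iban_formatter iban_formatter iban_formatter_alt
  generalize iban.toList = cs
  by_cases h : cs.length = 22
  · have h22 : (cs.length == 22) = true := by simp [h]
    rcases cs with _ | ⟨a0, cs⟩; · simp at h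
    rcases cs with _ | ⟨a1, cs⟩; · simp at h
    rcases cs with _ | ⟨a2, cs⟩; · simp at h
    rcases cs with _ | ⟨a3, cs⟩; · simp at h
    rcases cs with _ | ⟨a4, cs⟩; · simp at h
    rcases cs with _ | ⟨a5, cs⟩; · simp at h
    rcases cs with _ | ⟨a6, cs⟩; · simp at h
    rcases cs with _ | ⟨a7, cs⟩; · simp at h
    rcases cs with _ | ⟨a8, cs⟩; · simp at h
    rcases cs with _ | ⟨a9, cs⟩; · simp at h
    rcases cs with _ | ⟨a10, cs⟩; · simp at h
    rcases cs with _ | ⟨a11, cs⟩; · simp at h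
    rcases cs with _ | ⟨a12, cs⟩; · simp at h
    rcases cs with _ | ⟨a13, cs⟩; · simp at h
    rcases cs with _ | ⟨a14, cs⟩; · simp at h
    rcases cs with _ | ⟨a15, cs⟩; · simp at h
    rcases cs with _ | ⟨a16, cs⟩; · simp at h
    rcases cs with _ | ⟨a17, cs⟩; · simp at h
    rcases cs with _ | ⟨a18, cs⟩; · simp at h
    rcases cs with _ | ⟨a19, cs⟩; · simp at h
    rcases cs with _ | ⟨a20, cs⟩; · simp at h
    rcases cs with _ | ⟨a21, cs⟩; · simp at h
    rcases cs with _ | ⟨a22, cs⟩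
    · simp only [List.length_cons, List.length_nil]
      norm_num
      rw [show PySem.List.pyRange 0 (22:Int) 4 = [0,4,8,12,16,20] from by decide]
      norm_num [PySem.List.slice, PySem.List.clampIdx, Int.toNat, PySem.Chars.join,
        List.intercalate, List.intersperse, PySem.Int.mod, List.foldl]
      rw [strip_space_cons]
    · simp at h
  · simp [h]
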